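-- pv_equiv track=rewrite | github.com/pypi-data/pypi-mirror-360 | packages/memorydiagnostictool/memorydiagnostictool-0.18.0.tar.gz/memorydiagnostictool-0.18.0/MemoryDiagnosticTool/Trained_LOG_CSV.py | get_width_height
-- ===== SOURCE A (Python) =====
-- from collections import defaultdict
--
-- def get_width_height(eye):
--         width = {}
--         height = {}
--         for key, coords in eye.items():
--             x_to_ys = defaultdict(list)
--             for x, y in coords:
--                 x_to_ys[x].append(y)
--             # Height: max vertical range for fixed x
--             max_height = max(max(ys) - min(ys) for ys in x_to_ys.values())
--             height[key] = max_height
--             # Width: max x distance where y-ranges overlap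
--             xs = sorted(x_to_ys.keys())
--             max_width = 0
--             for i in range(len(xs)):
--                 x1 = xs[i]
--                 y1_min, y1_max = min(x_to_ys[x1]), max(x_to_ys[x1])
--                 for j in range(i + 1, len(xs)):
--                     x2 = xs[j]
--                     y2_min, y2_max = min(x_to_ys[x2]), max(x_to_ys[x2])
--                     # Check if y-ranges overlap
--                     if max(y1_min, y2_min) <= min(y1_max, y2_max):
--                         max_width = max(max_width, abs(x2 - x1))
--             width[key] = max_width
--         return width, height
-- ===== SOURCE B (Python) =====
-- def get_width_height(eye):
--     width = {}
--     height = {}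
--     for key, coords in eye.items():
--         # One pass: per x keep only the (ymin, ymax) interval.
--         rng = {}
--         for x, y in coords:
--             if x in rng:
--                 lo, hi = rng[x]
--                 rng[x] = (min(lo, y), max(hi, y))
--             else:
--                 rng[x] = (y, y)
--         height[key] = max(hi - lo for lo, hi in rng.values())
--         # Width via stab points: two intervals overlap iff they share a point,
--         # and max(lo1, lo2) is such a point, so it suffices to stab at each lo.
--         w = 0
--         for lo0, _ in rng.values():
--             hits = [x for x, (lo, hi) in rng.items() if lo <= lo0 <= hi]
--             w = max(w, max(hits) - min(hits))
--         width[key] = w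
--     return width, height
-- ===== Notes on version B (the rewrite author's own statement) =====
-- stated objective: alternative
-- what changed: B replaces A's per-x y-lists and sorted pairwise overlap scan (which recomputes min/max of each x's full y-list inside the inner loop) by a one-pass dict of per-x (ymin,ymax) intervals plus a stab-point scan: two intervals overlap iff some interval's lower end lies in both, so the max width is the max x-spread of the intervals stabbed at each ymin.
import Mathlib
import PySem

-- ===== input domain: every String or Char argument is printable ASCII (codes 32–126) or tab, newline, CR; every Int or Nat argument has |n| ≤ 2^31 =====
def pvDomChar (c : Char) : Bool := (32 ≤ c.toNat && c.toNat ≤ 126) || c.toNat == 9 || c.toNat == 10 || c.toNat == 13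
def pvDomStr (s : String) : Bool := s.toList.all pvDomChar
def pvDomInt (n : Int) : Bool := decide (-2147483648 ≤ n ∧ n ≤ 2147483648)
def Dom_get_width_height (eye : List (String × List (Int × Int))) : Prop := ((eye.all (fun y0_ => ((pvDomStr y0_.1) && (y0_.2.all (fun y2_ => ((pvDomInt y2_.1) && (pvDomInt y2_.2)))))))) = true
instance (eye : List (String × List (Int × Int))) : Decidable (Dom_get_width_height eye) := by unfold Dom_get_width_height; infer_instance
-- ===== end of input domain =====

-- B replaces A's sorted pairwise overlap scan (which recomputes min/max of each x's
-- full y-list inside the inner loop) by a one-pass per-x interval dict plus a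
-- stab-point scan: two y-ranges overlap iff some range's lower end lies in both.

-- ===== PORT A =====
-- Python max(ys) / min(ys) on an int list; A and B only evaluate them on nonempty
-- lists (the 0 default is never the result there).
def pyMaxI (ys : List Int) : Int := (PySem.List.max? ys (fun y => y)).getD 0
def pyMinI (ys : List Int) : Int := (PySem.List.min? ys (fun y => y)).getD 0

def get_width_height (eye : List (String × List (Int × Int))) : (List (String × Int)) × (List (String × Int)) :=
  let wh := eye.foldl (fun (wh : PySem.Dict String Int × PySem.Dict String Int) kc =>
    let key := kc.1
    let coords := kc.2
    let x_to_ys : PySem.Dict Int (List Int) :=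
      coords.foldl (fun d p => d.modify p.1 [] (fun x => x ++ [p.2])) PySem.Dict.empty
    let max_height := (PySem.List.max? (x_to_ys.values.map (fun ys => pyMaxI ys - pyMinI ys)) (fun v => v)).getD 0
    let height := wh.2.insert key max_height
    let xs := PySem.List.sorted x_to_ys.keys (fun x => x) false
    let n : Int := PySem.List.len xs
    let max_width := (PySem.List.pyRange 0 n 1).foldl (fun mw i =>
      let x1 := PySem.List.pyGetD xs i 0
      let y1min := pyMinI (x_to_ys.getD x1 [])
      let y1max := pyMaxI (x_to_ys.getD x1 [])
      (PySem.List.pyRange (i+1) n 1).foldl (fun mw j =>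
        let x2 := PySem.List.pyGetD xs j 0
        let y2min := pyMinI (x_to_ys.getD x2 [])
        let y2max := pyMaxI (x_to_ys.getD x2 [])
        if max y1min y2min ≤ min y1max y2max then max mw |x2 - x1| else mw) mw) 0
    let width := wh.1.insert key max_width
    (width, height)) (PySem.Dict.empty, PySem.Dict.empty)
  (wh.1.items, wh.2.items)

-- ===== PORT B =====
def get_width_height_alt (eye : List (String × List (Int × Int))) : (List (String × Int)) × (List (String × Int)) :=
  let wh := eye.foldl (fun (wh : PySem.Dict String Int × PySem.Dict String Int) kc =>
    let key := kc.1
    let coords := kc.2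
    let rng : PySem.Dict Int (Int × Int) :=
      coords.foldl (fun r p =>
        r.insert p.1 (match r.get? p.1 with
          | some lh => (min lh.1 p.2, max lh.2 p.2)
          | none => (p.2, p.2))) PySem.Dict.empty
    let max_height := (PySem.List.max? (rng.values.map (fun lh => lh.2 - lh.1)) (fun v => v)).getD 0
    let w := rng.values.foldl (fun w lh =>
      let hits := (rng.items.filter (fun q => decide (q.2.1 ≤ lh.1) && decide (lh.1 ≤ q.2.2))).map (fun q => q.1)
      max w (pyMaxI hits - pyMinI hits)) 0
    (wh.1.insert key w, wh.2.insert key max_height)) (PySem.Dict.empty, PySem.Dict.empty)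
  (wh.1.items, wh.2.items)

-- ===== PRECONDITION & SPEC =====
-- A raises ValueError (max() of an empty sequence) exactly when some key's
-- surviving coords list (the dict collapses repeated keys to the last value) is empty.
def Pre_get_width_height (eye : List (String × List (Int × Int))) : Prop :=
  ∀ ys ∈ (PySem.Dict.ofList eye).values, ys ≠ []
instance (eye : List (String × List (Int × Int))) : Decidable (Pre_get_width_height eye) := by unfold Pre_get_width_height; infer_instance
def pvWitness_get_width_height : (List (String × List (Int × Int))) := [("a", [(0, 0), (1, 1)])]

def Spec_get_width_height (eye : List (String × List (Int × Int))) (out : (List (String × Int)) × (List (String × Int))) : Prop := out = get_width_height_alt eye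
instance (eye : List (String × List (Int × Int))) (out : (List (String × Int)) × (List (String × Int))) : Decidable (Spec_get_width_height eye out) := by unfold Spec_get_width_height; infer_instance

-- ===== CLAIM (what is proved, stated in full; the proofs are below) =====
def Claim_equal_get_width_height : Prop := ∀ (eye : List (String × List (Int × Int))), Dom_get_width_height eye → Pre_get_width_height eye → Spec_get_width_height eye (get_width_height eye)

-- ===== LEMMAS AND PROOFS =====

theorem pyMinI_append_singleton (ys : List Int) (y : Int) :
    pyMinI (ys ++ [y]) = if ys.isEmpty then y else min (pyMinI ys) y := by
  cases ys with
  | nil => simp [pyMinI, PySem.List.min?_id_cons]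
  | cons x t =>
    simp only [List.cons_append, pyMinI, PySem.List.min?_id_cons, Option.getD_some,
      List.isEmpty_cons, List.foldl_append, List.foldl_cons, List.foldl_nil]
    simp

theorem pyMaxI_append_singleton (ys : List Int) (y : Int) :
    pyMaxI (ys ++ [y]) = if ys.isEmpty then y else max (pyMaxI ys) y := by
  cases ys with
  | nil => simp [pyMaxI, PySem.List.max?_id_cons]
  | cons x t =>
    simp only [List.cons_append, pyMaxI, PySem.List.max?_id_cons, Option.getD_some,
      List.isEmpty_cons, List.foldl_append, List.foldl_cons, List.foldl_nil]
    simp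

theorem foldl_le_iff_of_step {α : Type} (L : List α) (s : Int → α → Int) (Q : α → Int → Prop)
    (hs : ∀ w a c, s w a ≤ c ↔ w ≤ c ∧ Q a c) (w0 c : Int) :
    L.foldl s w0 ≤ c ↔ w0 ≤ c ∧ ∀ a ∈ L, Q a c := by
  induction L generalizing w0 with
  | nil => simp
  | cons a t ih =>
    simp only [List.foldl_cons, ih, hs, List.mem_cons]
    constructor
    · rintro ⟨⟨h1, h2⟩, h3⟩; exact ⟨h1, fun b hb => hb.elim (fun e => e ▸ h2) (h3 b)⟩
    · rintro ⟨h1, h3⟩; exact ⟨⟨h1, h3 a (Or.inl rfl)⟩, fun b hb => h3 b (Or.inr hb)⟩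

theorem pyMinI_le_mem {xs : List Int} {x : Int} (hx : x ∈ xs) : pyMinI xs ≤ x := by
  rcases xs with _ | ⟨a, t⟩
  · simp at hx
  · have h := PySem.List.min?_isMin (xs := a :: t) (key := fun y => y) (m := t.foldl min a)
      (PySem.List.min?_id_cons a t)
    simpa [pyMinI, PySem.List.min?_id_cons] using h x hx

theorem mem_le_pyMaxI {xs : List Int} {x : Int} (hx : x ∈ xs) : x ≤ pyMaxI xs := by
  rcases xs with _ | ⟨a, t⟩
  · simp at hx
  · have h := PySem.List.max?_isMax (xs := a :: t) (key := fun y => y) (m := t.foldl max a)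
      (PySem.List.max?_id_cons a t)
    simpa [pyMaxI, PySem.List.max?_id_cons] using h x hx

theorem pyMinI_mem {xs : List Int} (h : xs ≠ []) : pyMinI xs ∈ xs := by
  rcases xs with _ | ⟨a, t⟩
  · simp at h
  · have := PySem.List.min?_mem (xs := a :: t) (key := fun y => y) (m := t.foldl min a)
      (PySem.List.min?_id_cons a t)
    simpa [pyMinI, PySem.List.min?_id_cons] using this

theorem pyMaxI_mem {xs : List Int} (h : xs ≠ []) : pyMaxI xs ∈ xs := by
  rcases xs with _ | ⟨a, t⟩
  · simp at h
  · have := PySem.List.max?_mem (xs := a :: t) (key := fun y => y) (m := t.foldl max a)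
      (PySem.List.max?_id_cons a t)
    simpa [pyMaxI, PySem.List.max?_id_cons] using this

theorem rng_get? (coords : List (Int × Int)) (k : Int) :
    (coords.foldl (fun r p =>
        r.insert p.1 (match r.get? p.1 with
          | some lh => (min lh.1 p.2, max lh.2 p.2)
          | none => (p.2, p.2))) PySem.Dict.empty).get? k =
      (if ((coords.filter (fun p => p.1 == k)).map (fun p => p.2)).isEmpty then none
       else some (pyMinI ((coords.filter (fun p => p.1 == k)).map (fun p => p.2)),
                  pyMaxI ((coords.filter (fun p => p.1 == k)).map (fun p => p.2)))) := by
  induction coords using List.reverseRecOn with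
  | nil => simp [PySem.Dict.get?_empty]
  | append_singleton cs p ih =>
    rw [List.foldl_append, List.foldl_cons, List.foldl_nil]
    rw [List.filter_append, List.map_append]
    by_cases hk : p.1 = k
    · have hf : List.filter (fun p => p.1 == k) [p] = [p] := by simp [hk]
      rw [hf, List.map_cons, List.map_nil]
      rw [PySem.Dict.get?_insert, if_pos hk.symm, hk, ih]
      rw [pyMinI_append_singleton, pyMaxI_append_singleton]
      by_cases he : (List.map (fun p => p.2) (List.filter (fun p => p.1 == k) cs)).isEmpty
      · simp [he]
      · simp [he]
    · have hf : List.filter (fun p => p.1 == k) [p] = [] := by simp [hk]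
      rw [hf, List.map_nil, List.append_nil]
      rw [PySem.Dict.get?_insert, if_neg (Ne.symm hk), ih]

theorem width_core (K : List Int) (hnd : K.Nodup) (f : Int → Int × Int)
    (hlh : ∀ k ∈ K, (f k).1 ≤ (f k).2) :
    ((PySem.List.pyRange 0 (PySem.List.len (PySem.List.sorted K (fun x => x) false)) 1).foldl (fun mw i =>
      (PySem.List.pyRange (i+1) (PySem.List.len (PySem.List.sorted K (fun x => x) false)) 1).foldl (fun mw j =>
        if max (f (PySem.List.pyGetD (PySem.List.sorted K (fun x => x) false) i 0)).1
               (f (PySem.List.pyGetD (PySem.List.sorted K (fun x => x) false) j 0)).1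
           ≤ min (f (PySem.List.pyGetD (PySem.List.sorted K (fun x => x) false) i 0)).2
                 (f (PySem.List.pyGetD (PySem.List.sorted K (fun x => x) false) j 0)).2
        then max mw |PySem.List.pyGetD (PySem.List.sorted K (fun x => x) false) j 0 -
                     PySem.List.pyGetD (PySem.List.sorted K (fun x => x) false) i 0| else mw) mw) 0)
    = K.foldl (fun w k =>
        max w (pyMaxI (K.filter (fun k' => decide ((f k').1 ≤ (f k).1) && decide ((f k).1 ≤ (f k').2)))
             - pyMinI (K.filter (fun k' => decide ((f k').1 ≤ (f k).1) && decide ((f k).1 ≤ (f k').2))))) 0 := by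
  have hperm : (PySem.List.sorted K (fun x => x) false).Perm K := PySem.List.sorted_perm K (fun x => x) false
  have hndxs : (PySem.List.sorted K (fun x => x) false).Nodup := (hperm.nodup_iff).mpr hnd
  set xs := PySem.List.sorted K (fun x => x) false with hxs
  set n : Int := PySem.List.len xs with hn
  have hnlen : n = (xs.length : Int) := by rw [hn, PySem.List.len_eq]
  -- strict monotonicity of sorted distinct keys
  have hstrict : ∀ (p q : Nat) (hq : q < xs.length) (hpq : p < q), xs[p]'(by omega) < xs[q] := by
    intro p q hq hpq
    have hle := PySem.List.sorted_id_getElem_mono K (p := p) (q := q) (le_of_lt hpq) hq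
    have hne : xs[p]'(by omega) ≠ xs[q] := by
      intro he
      exact absurd ((List.Nodup.getElem_inj_iff hndxs).mp he) (by omega)
    exact lt_of_le_of_ne hle hne
  -- the two ≤-characterisations
  have innerIff : ∀ (i : Int) (w c : Int),
      ((PySem.List.pyRange (i+1) n 1).foldl (fun mw j =>
        if max (f (PySem.List.pyGetD xs i 0)).1 (f (PySem.List.pyGetD xs j 0)).1
           ≤ min (f (PySem.List.pyGetD xs i 0)).2 (f (PySem.List.pyGetD xs j 0)).2
        then max mw |PySem.List.pyGetD xs j 0 - PySem.List.pyGetD xs i 0| else mw) w ≤ c)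
      ↔ w ≤ c ∧ ∀ j ∈ PySem.List.pyRange (i+1) n 1,
          (max (f (PySem.List.pyGetD xs i 0)).1 (f (PySem.List.pyGetD xs j 0)).1
           ≤ min (f (PySem.List.pyGetD xs i 0)).2 (f (PySem.List.pyGetD xs j 0)).2
           → |PySem.List.pyGetD xs j 0 - PySem.List.pyGetD xs i 0| ≤ c) := by
    intro i w c
    apply foldl_le_iff_of_step
    intro w j c
    split_ifs with h
    · rw [max_le_iff]; tauto
    · tauto
  have lhsIff : ∀ (c : Int),
      ((PySem.List.pyRange 0 n 1).foldl (fun mw i =>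
        (PySem.List.pyRange (i+1) n 1).foldl (fun mw j =>
          if max (f (PySem.List.pyGetD xs i 0)).1 (f (PySem.List.pyGetD xs j 0)).1
             ≤ min (f (PySem.List.pyGetD xs i 0)).2 (f (PySem.List.pyGetD xs j 0)).2
          then max mw |PySem.List.pyGetD xs j 0 - PySem.List.pyGetD xs i 0| else mw) mw) 0 ≤ c)
      ↔ 0 ≤ c ∧ ∀ i ∈ PySem.List.pyRange 0 n 1, ∀ j ∈ PySem.List.pyRange (i+1) n 1,
          (max (f (PySem.List.pyGetD xs i 0)).1 (f (PySem.List.pyGetD xs j 0)).1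
           ≤ min (f (PySem.List.pyGetD xs i 0)).2 (f (PySem.List.pyGetD xs j 0)).2
           → |PySem.List.pyGetD xs j 0 - PySem.List.pyGetD xs i 0| ≤ c) := by
    intro c
    apply foldl_le_iff_of_step
    intro w i c
    exact innerIff i w c
  have rhsIff : ∀ (c : Int),
      (K.foldl (fun w k =>
        max w (pyMaxI (K.filter (fun k' => decide ((f k').1 ≤ (f k).1) && decide ((f k).1 ≤ (f k').2)))
             - pyMinI (K.filter (fun k' => decide ((f k').1 ≤ (f k).1) && decide ((f k).1 ≤ (f k').2))))) 0 ≤ c)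
      ↔ 0 ≤ c ∧ ∀ k ∈ K,
          pyMaxI (K.filter (fun k' => decide ((f k').1 ≤ (f k).1) && decide ((f k).1 ≤ (f k').2)))
          - pyMinI (K.filter (fun k' => decide ((f k').1 ≤ (f k).1) && decide ((f k).1 ≤ (f k').2))) ≤ c := by
    intro c
    apply foldl_le_iff_of_step
    intro w k c
    rw [max_le_iff]
  -- self-bounds
  obtain ⟨hA0, hAlow⟩ := (lhsIff _).mp le_rfl
  obtain ⟨hB0, hBlow⟩ := (rhsIff _).mp le_rfl
  apply le_antisymm
  · refine (lhsIff _).mpr ⟨hB0, ?_⟩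
    intro i hi j hj
    obtain ⟨hi0, hin⟩ := PySem.List.mem_pyRange_one.mp hi
    obtain ⟨hji, hjn⟩ := PySem.List.mem_pyRange_one.mp hj
    have hilen : i < (xs.length : Int) := by omega
    have hjlen : j < (xs.length : Int) := by omega
    rw [PySem.List.pyGetD_eq_getElem xs 0 hi0 hilen,
        PySem.List.pyGetD_eq_getElem xs 0 (by omega) hjlen]
    intro hcond
    have hqlen : j.toNat < xs.length := by omega
    have hlt : xs[i.toNat]'(by omega) < xs[j.toNat] := hstrict i.toNat j.toNat hqlen (by omega)
    have hK1 : xs[i.toNat]'(by omega) ∈ K := hperm.subset (List.getElem_mem _)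
    have hK2 : xs[j.toNat] ∈ K := hperm.subset (List.getElem_mem _)
    have habs : |xs[j.toNat] - xs[i.toNat]'(by omega)| = xs[j.toNat] - xs[i.toNat]'(by omega) :=
      abs_of_nonneg (by omega)
    rw [habs]
    rcases max_choice (f (xs[i.toNat]'(by omega))).1 (f (xs[j.toNat])).1 with hmx | hmx
    · -- stab point is lo of x1
      refine le_trans ?_ (hBlow _ hK1)
      have hx1 : xs[i.toNat]'(by omega) ∈ K.filter (fun k' => decide ((f k').1 ≤ (f (xs[i.toNat]'(by omega))).1) && decide ((f (xs[i.toNat]'(by omega))).1 ≤ (f k').2)) := by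
        refine List.mem_filter.mpr ⟨hK1, ?_⟩
        simp only [Bool.and_eq_true, decide_eq_true_eq]
        exact ⟨le_refl _, hmx ▸ le_trans hcond (min_le_left _ _)⟩
      have hx2 : xs[j.toNat] ∈ K.filter (fun k' => decide ((f k').1 ≤ (f (xs[i.toNat]'(by omega))).1) && decide ((f (xs[i.toNat]'(by omega))).1 ≤ (f k').2)) := by
        refine List.mem_filter.mpr ⟨hK2, ?_⟩
        simp only [Bool.and_eq_true, decide_eq_true_eq]
        exact ⟨hmx ▸ le_max_right _ _, hmx ▸ le_trans hcond (min_le_right _ _)⟩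
      have h1 := pyMinI_le_mem hx1
      have h2 := mem_le_pyMaxI hx2
      omega
    · -- stab point is lo of x2
      refine le_trans ?_ (hBlow _ hK2)
      have hx1 : xs[i.toNat]'(by omega) ∈ K.filter (fun k' => decide ((f k').1 ≤ (f (xs[j.toNat])).1) && decide ((f (xs[j.toNat])).1 ≤ (f k').2)) := by
        refine List.mem_filter.mpr ⟨hK1, ?_⟩
        simp only [Bool.and_eq_true, decide_eq_true_eq]
        exact ⟨hmx ▸ le_max_left _ _, hmx ▸ le_trans hcond (min_le_left _ _)⟩
      have hx2 : xs[j.toNat] ∈ K.filter (fun k' => decide ((f k').1 ≤ (f (xs[j.toNat])).1) && decide ((f (xs[j.toNat])).1 ≤ (f k').2)) := by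
        refine List.mem_filter.mpr ⟨hK2, ?_⟩
        simp only [Bool.and_eq_true, decide_eq_true_eq]
        exact ⟨le_refl _, hmx ▸ le_trans hcond (min_le_right _ _)⟩
      have h1 := pyMinI_le_mem hx1
      have h2 := mem_le_pyMaxI hx2
      omega
  · refine (rhsIff _).mpr ⟨hA0, ?_⟩
    intro k hk
    have hkk : k ∈ K.filter (fun k' => decide ((f k').1 ≤ (f k).1) && decide ((f k).1 ≤ (f k').2)) := by
      refine List.mem_filter.mpr ⟨hk, ?_⟩
      simp only [Bool.and_eq_true, decide_eq_true_eq]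
      exact ⟨le_refl _, hlh k hk⟩
    have hne : K.filter (fun k' => decide ((f k').1 ≤ (f k).1) && decide ((f k).1 ≤ (f k').2)) ≠ [] :=
      List.ne_nil_of_mem hkk
    have hm := pyMinI_mem hne
    have hM := pyMaxI_mem hne
    have hmM : pyMinI (K.filter (fun k' => decide ((f k').1 ≤ (f k).1) && decide ((f k).1 ≤ (f k').2)))
        ≤ pyMaxI (K.filter (fun k' => decide ((f k').1 ≤ (f k).1) && decide ((f k).1 ≤ (f k').2))) :=
      pyMinI_le_mem hM
    by_cases heq : pyMinI (K.filter (fun k' => decide ((f k').1 ≤ (f k).1) && decide ((f k).1 ≤ (f k').2)))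
        = pyMaxI (K.filter (fun k' => decide ((f k').1 ≤ (f k).1) && decide ((f k).1 ≤ (f k').2)))
    · omega
    · obtain ⟨hmK, hmc⟩ := List.mem_filter.mp hm
      obtain ⟨hMK, hMc⟩ := List.mem_filter.mp hM
      simp only [Bool.and_eq_true, decide_eq_true_eq] at hmc hMc
      obtain ⟨p, hp, hpe⟩ := List.mem_iff_getElem.mp (hperm.mem_iff.mpr hmK)
      obtain ⟨q, hq, hqe⟩ := List.mem_iff_getElem.mp (hperm.mem_iff.mpr hMK)
      have hpq : p < q := by
        by_contra hle
        push Not at hle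
        rcases Nat.eq_or_lt_of_le hle with he | hlt2
        · subst he
          exact heq (hpe.symm.trans hqe)
        · have := hstrict q p hp hlt2
          omega
      have := hAlow (p : Int) (PySem.List.mem_pyRange_one.mpr (by omega))
        (q : Int) (PySem.List.mem_pyRange_one.mpr (by omega))
      rw [PySem.List.pyGetD_eq_getElem xs 0 (by omega) (by exact_mod_cast hp),
          PySem.List.pyGetD_eq_getElem xs 0 (by omega) (by exact_mod_cast hq)] at this
      simp only [Int.toNat_natCast] at this
      rw [hpe, hqe] at this
      have hcond2 : max (f (pyMinI (K.filter (fun k' => decide ((f k').1 ≤ (f k).1) && decide ((f k).1 ≤ (f k').2))))).1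
            (f (pyMaxI (K.filter (fun k' => decide ((f k').1 ≤ (f k).1) && decide ((f k).1 ≤ (f k').2))))).1
          ≤ min (f (pyMinI (K.filter (fun k' => decide ((f k').1 ≤ (f k).1) && decide ((f k).1 ≤ (f k').2))))).2
            (f (pyMaxI (K.filter (fun k' => decide ((f k').1 ≤ (f k).1) && decide ((f k).1 ≤ (f k').2))))).2 :=
        le_trans (max_le hmc.1 hMc.1) (le_min hmc.2 hMc.2)
      have hfin := this hcond2
      rw [abs_of_nonneg (by omega)] at hfin
      omega

theorem keys_eq (coords : List (Int × Int)) :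
    (coords.foldl (fun (r : PySem.Dict Int (Int × Int)) p =>
        r.insert p.1 (match r.get? p.1 with
          | some lh => (min lh.1 p.2, max lh.2 p.2)
          | none => (p.2, p.2))) PySem.Dict.empty).keys
    = (coords.foldl (fun d p => d.modify p.1 [] (fun x => x ++ [p.2])) PySem.Dict.empty).keys := by
  rw [PySem.Dict.keys_foldl_insert_key coords (fun p => p.1)
        (fun (r : PySem.Dict Int (Int × Int)) p => match r.get? p.1 with
          | some lh => (min lh.1 p.2, max lh.2 p.2)
          | none => (p.2, p.2)) PySem.Dict.empty,
      PySem.Dict.keys_foldl_modify_key coords (fun p => p.1) []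
        (fun d p => fun x => x ++ [p.2]) PySem.Dict.empty]
  rfl

theorem nodupA (coords : List (Int × Int)) :
    (coords.foldl (fun d p => d.modify p.1 [] (fun x => x ++ [p.2])) PySem.Dict.empty).keys.Nodup :=
  PySem.Dict.nodup_keys_foldl_modify_key coords (fun p => p.1) [] (fun d p => fun x => x ++ [p.2])
    PySem.Dict.empty (by simp [PySem.Dict.keys_empty])

theorem nodupB (coords : List (Int × Int)) :
    (coords.foldl (fun (r : PySem.Dict Int (Int × Int)) p =>
        r.insert p.1 (match r.get? p.1 with
          | some lh => (min lh.1 p.2, max lh.2 p.2)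
          | none => (p.2, p.2))) PySem.Dict.empty).keys.Nodup :=
  PySem.Dict.nodup_keys_foldl_insert_key coords (fun p => p.1)
    (fun (r : PySem.Dict Int (Int × Int)) p => match r.get? p.1 with
      | some lh => (min lh.1 p.2, max lh.2 p.2)
      | none => (p.2, p.2)) PySem.Dict.empty (by simp [PySem.Dict.keys_empty])

-- B's dict lookup = (min, max) of A's grouped y-list

theorem getD_eq (coords : List (Int × Int)) (k : Int) :
    (coords.foldl (fun r p =>
        r.insert p.1 (match r.get? p.1 with
          | some lh => (min lh.1 p.2, max lh.2 p.2)
          | none => (p.2, p.2))) PySem.Dict.empty).getD k (0, 0)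
    = (pyMinI ((coords.foldl (fun d p => d.modify p.1 [] (fun x => x ++ [p.2])) PySem.Dict.empty).getD k []),
       pyMaxI ((coords.foldl (fun d p => d.modify p.1 [] (fun x => x ++ [p.2])) PySem.Dict.empty).getD k [])) := by
  have hA : (coords.foldl (fun d p => d.modify p.1 [] (fun x => x ++ [p.2])) PySem.Dict.empty).getD k []
      = (coords.filter (fun p => p.1 == k)).map (fun p => p.2) := by
    rw [PySem.Dict.getD_foldl_modify_append coords PySem.Dict.empty k]
    simp [PySem.Dict.getD_empty]
  rw [hA, PySem.Dict.getD_eq_get?_getD, rng_get? coords k]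
  by_cases he : ((coords.filter (fun p => p.1 == k)).map (fun p => p.2)).isEmpty
  · have : (coords.filter (fun p => p.1 == k)).map (fun p => p.2) = [] := by
      simpa [List.isEmpty_iff] using he
    rw [if_pos he, this]
    simp [pyMinI, pyMaxI, PySem.List.min?, PySem.List.max?]
  · rw [if_neg he]
    rfl
-- membership in A's keys ↔ grouped list nonempty

theorem mem_keysA (coords : List (Int × Int)) (k : Int) :
    k ∈ (coords.foldl (fun d p => d.modify p.1 [] (fun x => x ++ [p.2])) PySem.Dict.empty).keys
    ↔ (coords.filter (fun p => p.1 == k)) ≠ [] := by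
  rw [PySem.Dict.keys_foldl_modify_key coords (fun p => p.1) []
        (fun d p => fun x => x ++ [p.2]) PySem.Dict.empty]
  rw [PySem.Dict.keys_empty]
  have hupd : PySem.Set.update ([] : List Int) (coords.map (fun p => p.1)) = PySem.Set.ofList (coords.map (fun p => p.1)) := by
    rw [PySem.Set.ofList_eq_foldl]; rfl
  rw [hupd, PySem.Set.mem_ofList]
  constructor
  · intro h
    obtain ⟨p, hp, hpk⟩ := List.mem_map.mp h
    exact List.ne_nil_of_mem (List.mem_filter.mpr ⟨hp, by simp [hpk]⟩)
  · intro h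
    obtain ⟨p, hp⟩ := List.exists_mem_of_ne_nil _ h
    obtain ⟨hpc, hpk⟩ := List.mem_filter.mp hp
    exact List.mem_map.mpr ⟨p, hpc, by simpa using hpk⟩

theorem getDA (coords : List (Int × Int)) (k : Int) :
    (coords.foldl (fun d p => d.modify p.1 [] (fun x => x ++ [p.2])) PySem.Dict.empty).getD k []
    = (coords.filter (fun p => p.1 == k)).map (fun p => p.2) := by
  rw [PySem.Dict.getD_foldl_modify_append coords PySem.Dict.empty k]
  simp [PySem.Dict.getD_empty]

theorem hlhK (coords : List (Int × Int)) :
    ∀ k ∈ (coords.foldl (fun d p => d.modify p.1 [] (fun x => x ++ [p.2])) PySem.Dict.empty).keys,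
      ((coords.foldl (fun (r : PySem.Dict Int (Int × Int)) p =>
        r.insert p.1 (match r.get? p.1 with
          | some lh => (min lh.1 p.2, max lh.2 p.2)
          | none => (p.2, p.2))) PySem.Dict.empty).getD k (0, 0)).1
      ≤ ((coords.foldl (fun (r : PySem.Dict Int (Int × Int)) p =>
        r.insert p.1 (match r.get? p.1 with
          | some lh => (min lh.1 p.2, max lh.2 p.2)
          | none => (p.2, p.2))) PySem.Dict.empty).getD k (0, 0)).2 := by
  intro k hk
  rw [getD_eq, getDA]
  have hne : (coords.filter (fun p => p.1 == k)).map (fun p => p.2) ≠ [] := by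
    simpa using (mem_keysA coords k).mp hk
  exact pyMinI_le_mem (pyMaxI_mem hne)

-- per-key height equality

theorem perkey_h (coords : List (Int × Int)) :
    (PySem.List.max? (((coords.foldl (fun d p => d.modify p.1 [] (fun x => x ++ [p.2])) PySem.Dict.empty).values).map
        (fun ys => pyMaxI ys - pyMinI ys)) (fun v => v)).getD 0
    = (PySem.List.max? (((coords.foldl (fun (r : PySem.Dict Int (Int × Int)) p =>
        r.insert p.1 (match r.get? p.1 with
          | some lh => (min lh.1 p.2, max lh.2 p.2)
          | none => (p.2, p.2))) PySem.Dict.empty).values).map (fun lh => lh.2 - lh.1)) (fun v => v)).getD 0 := by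
  have hv : ((coords.foldl (fun (r : PySem.Dict Int (Int × Int)) p =>
        r.insert p.1 (match r.get? p.1 with
          | some lh => (min lh.1 p.2, max lh.2 p.2)
          | none => (p.2, p.2))) PySem.Dict.empty).values).map (fun lh => lh.2 - lh.1)
      = ((coords.foldl (fun d p => d.modify p.1 [] (fun x => x ++ [p.2])) PySem.Dict.empty).values).map
        (fun ys => pyMaxI ys - pyMinI ys) := by
    rw [PySem.Dict.values_eq_map_keys _ (nodupB coords) (0, 0),
        PySem.Dict.values_eq_map_keys _ (nodupA coords) [], keys_eq, List.map_map, List.map_map]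
    apply List.map_congr_left
    intro k hk
    simp only [Function.comp]
    rw [getD_eq]
  rw [hv]

theorem perkey_w (coords : List (Int × Int)) :
    ((PySem.List.pyRange 0 (PySem.List.len (PySem.List.sorted
        (coords.foldl (fun d p => d.modify p.1 [] (fun x => x ++ [p.2])) PySem.Dict.empty).keys (fun x => x) false)) 1).foldl (fun mw i =>
      (PySem.List.pyRange (i+1) (PySem.List.len (PySem.List.sorted
        (coords.foldl (fun d p => d.modify p.1 [] (fun x => x ++ [p.2])) PySem.Dict.empty).keys (fun x => x) false)) 1).foldl (fun mw j =>
        if max (pyMinI ((coords.foldl (fun d p => d.modify p.1 [] (fun x => x ++ [p.2])) PySem.Dict.empty).getD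
                  (PySem.List.pyGetD (PySem.List.sorted (coords.foldl (fun d p => d.modify p.1 [] (fun x => x ++ [p.2])) PySem.Dict.empty).keys (fun x => x) false) i 0) []))
               (pyMinI ((coords.foldl (fun d p => d.modify p.1 [] (fun x => x ++ [p.2])) PySem.Dict.empty).getD
                  (PySem.List.pyGetD (PySem.List.sorted (coords.foldl (fun d p => d.modify p.1 [] (fun x => x ++ [p.2])) PySem.Dict.empty).keys (fun x => x) false) j 0) []))
           ≤ min (pyMaxI ((coords.foldl (fun d p => d.modify p.1 [] (fun x => x ++ [p.2])) PySem.Dict.empty).getD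
                  (PySem.List.pyGetD (PySem.List.sorted (coords.foldl (fun d p => d.modify p.1 [] (fun x => x ++ [p.2])) PySem.Dict.empty).keys (fun x => x) false) i 0) []))
                 (pyMaxI ((coords.foldl (fun d p => d.modify p.1 [] (fun x => x ++ [p.2])) PySem.Dict.empty).getD
                  (PySem.List.pyGetD (PySem.List.sorted (coords.foldl (fun d p => d.modify p.1 [] (fun x => x ++ [p.2])) PySem.Dict.empty).keys (fun x => x) false) j 0) []))
        then max mw |PySem.List.pyGetD (PySem.List.sorted (coords.foldl (fun d p => d.modify p.1 [] (fun x => x ++ [p.2])) PySem.Dict.empty).keys (fun x => x) false) j 0 -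
                     PySem.List.pyGetD (PySem.List.sorted (coords.foldl (fun d p => d.modify p.1 [] (fun x => x ++ [p.2])) PySem.Dict.empty).keys (fun x => x) false) i 0| else mw) mw) 0)
    = ((coords.foldl (fun (r : PySem.Dict Int (Int × Int)) p =>
        r.insert p.1 (match r.get? p.1 with
          | some lh => (min lh.1 p.2, max lh.2 p.2)
          | none => (p.2, p.2))) PySem.Dict.empty).values).foldl (fun w lh =>
      max w (pyMaxI (((coords.foldl (fun (r : PySem.Dict Int (Int × Int)) p =>
        r.insert p.1 (match r.get? p.1 with
          | some lh => (min lh.1 p.2, max lh.2 p.2)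
          | none => (p.2, p.2))) PySem.Dict.empty).items.filter (fun q => decide (q.2.1 ≤ lh.1) && decide (lh.1 ≤ q.2.2))).map (fun q => q.1))
           - pyMinI (((coords.foldl (fun (r : PySem.Dict Int (Int × Int)) p =>
        r.insert p.1 (match r.get? p.1 with
          | some lh => (min lh.1 p.2, max lh.2 p.2)
          | none => (p.2, p.2))) PySem.Dict.empty).items.filter (fun q => decide (q.2.1 ≤ lh.1) && decide (lh.1 ≤ q.2.2))).map (fun q => q.1)))) 0 := by
  have h1 : ∀ x, pyMinI ((coords.foldl (fun d p => d.modify p.1 [] (fun x => x ++ [p.2])) PySem.Dict.empty).getD x [])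
      = ((coords.foldl (fun (r : PySem.Dict Int (Int × Int)) p =>
        r.insert p.1 (match r.get? p.1 with
          | some lh => (min lh.1 p.2, max lh.2 p.2)
          | none => (p.2, p.2))) PySem.Dict.empty).getD x (0, 0)).1 := by
    intro x; rw [getD_eq]
  have h2 : ∀ x, pyMaxI ((coords.foldl (fun d p => d.modify p.1 [] (fun x => x ++ [p.2])) PySem.Dict.empty).getD x [])
      = ((coords.foldl (fun (r : PySem.Dict Int (Int × Int)) p =>
        r.insert p.1 (match r.get? p.1 with
          | some lh => (min lh.1 p.2, max lh.2 p.2)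
          | none => (p.2, p.2))) PySem.Dict.empty).getD x (0, 0)).2 := by
    intro x; rw [getD_eq]
  simp only [h1, h2]
  rw [PySem.Dict.values_eq_map_keys _ (nodupB coords) (0, 0),
      PySem.Dict.items_eq_map_keys _ (nodupB coords) (0, 0), keys_eq]
  simp only [List.foldl_map, List.filter_map, List.map_map, Function.comp_def, List.map_id']
  exact width_core _ (nodupA coords) _ (hlhK coords)

-- ===== VERDICT (by name: the statement is the Claim_ definition above) =====
theorem get_width_height_spec : Claim_equal_get_width_height := by
  intro eye _ _
  unfold Spec_get_width_height get_width_height get_width_height_alt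
  dsimp only
  refine congrArg (fun z : PySem.Dict String Int × PySem.Dict String Int => (z.1.items, z.2.items)) ?_
  apply PySem.List.foldl_congr_mem
  intro acc kc _
  dsimp only
  rw [perkey_w kc.2, perkey_h kc.2]
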